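-- pv_equiv track=rewrite | github.com/elasticdotventures/dotfiles | b00t-j0b-py/src/b00t_j0b_py/advanced_jobs.py | _analyze_depth_distribution
-- ===== SOURCE A (Python) =====
-- from typing import Dict, Any, List, Optional
--
-- def _analyze_depth_distribution(hierarchical_map: Dict[str, Dict[str, Any]]) -> Dict[str, Any]:
--     """Analyze the distribution of content across crawl depths."""
--     depth_stats = {}
--
--     for url, data in hierarchical_map.items():
--         depth = data.get("depth", 0)
--
--         if depth not in depth_stats:
--             depth_stats[depth] = {
--                 "pages": 0,
--                 "total_chunks": 0,
--                 "structural_elements": 0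
--             }
--
--         depth_stats[depth]["pages"] += 1
--         depth_stats[depth]["total_chunks"] += data.get("total_chunks", 0)
--         depth_stats[depth]["structural_elements"] += data.get("structural_elements", 0)
--
--     return depth_stats
-- ===== SOURCE B (Python) =====
-- from collections import defaultdict
--
-- def _analyze_depth_distribution(hierarchical_map):
--     """Analyze the distribution of content across crawl depths."""
--     buckets = defaultdict(list)
--     for url, data in hierarchical_map.items():
--         buckets[data.get("depth", 0)].append(data)
--     return {
--         depth: {
--             "pages": len(group),
--             "total_chunks": sum(d.get("total_chunks", 0) for d in group),
--             "structural_elements": sum(d.get("structural_elements", 0) for d in group),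
--         }
--         for depth, group in buckets.items()
--     }
-- ===== Notes on version B (the rewrite author's own statement) =====
-- stated objective: alternative
-- what changed: Replaces A's single pass that conditionally initializes and mutates per-depth counter dicts with a partition-then-reduce: one pass groups the data dicts per depth into a defaultdict(list), then a second pass builds each stats dict at once from len/sum over the bucket.
import Mathlib
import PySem

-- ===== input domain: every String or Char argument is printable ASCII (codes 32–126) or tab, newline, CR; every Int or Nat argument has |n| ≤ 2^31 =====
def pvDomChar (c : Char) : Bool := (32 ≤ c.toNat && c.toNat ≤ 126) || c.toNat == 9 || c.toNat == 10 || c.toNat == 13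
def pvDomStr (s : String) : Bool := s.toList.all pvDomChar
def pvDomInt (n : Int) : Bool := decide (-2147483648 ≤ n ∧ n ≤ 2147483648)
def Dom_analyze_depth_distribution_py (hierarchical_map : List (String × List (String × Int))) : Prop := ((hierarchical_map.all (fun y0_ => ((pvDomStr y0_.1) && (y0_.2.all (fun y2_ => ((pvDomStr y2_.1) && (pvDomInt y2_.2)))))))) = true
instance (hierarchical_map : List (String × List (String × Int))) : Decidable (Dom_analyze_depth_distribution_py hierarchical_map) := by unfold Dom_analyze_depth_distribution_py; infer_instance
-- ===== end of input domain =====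

-- B replaces A's single pass of conditional init + in-place counter mutation by a partition-then-reduce
-- (group the data dicts per depth, then build each stats dict at once from len/sum); alternative decomposition, same cost.


-- shared primitive: data.get(k, 0) on an association list (first match)
def pvGet0 (data : List (String × Int)) (k : String) : Int := (data.lookup k).getD 0

-- ===== PORT A =====
-- loop body of A: conditional initialisation, then the three '+=' mutations of the inner dict
def pvAStep (depth_stats : PySem.Dict Int (PySem.Dict String Int))
    (x : String × List (String × Int)) : PySem.Dict Int (PySem.Dict String Int) :=
  let data := x.2
  let depth := pvGet0 data "depth"
  let depth_stats :=
    if depth_stats.contains depth then depth_stats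
    else depth_stats.insert depth
      (PySem.Dict.ofList [("pages", 0), ("total_chunks", 0), ("structural_elements", 0)])
  let depth_stats := depth_stats.modify depth PySem.Dict.empty (fun s => s.modify "pages" 0 (· + 1))
  let depth_stats := depth_stats.modify depth PySem.Dict.empty
    (fun s => s.modify "total_chunks" 0 (· + pvGet0 data "total_chunks"))
  depth_stats.modify depth PySem.Dict.empty
    (fun s => s.modify "structural_elements" 0 (· + pvGet0 data "structural_elements"))

def analyze_depth_distribution_py (hierarchical_map : List (String × List (String × Int))) :
    List (Int × List (String × Int)) :=
  let depth_stats := hierarchical_map.foldl pvAStep PySem.Dict.empty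
  depth_stats.items.map (fun p => (p.1, p.2.items))

-- ===== PORT B =====
-- the stats dict B builds at once for one bucket
def pvStats (group : List (List (String × Int))) : List (String × Int) :=
  [("pages", (group.length : Int)),
   ("total_chunks", (group.map (fun d => pvGet0 d "total_chunks")).sum),
   ("structural_elements", (group.map (fun d => pvGet0 d "structural_elements")).sum)]

-- loop body of B: buckets[depth].append(data)  (defaultdict(list))
def pvBStep (buckets : PySem.Dict Int (List (List (String × Int))))
    (x : String × List (String × Int)) : PySem.Dict Int (List (List (String × Int))) :=
  buckets.modify (pvGet0 x.2 "depth") [] (· ++ [x.2])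

def analyze_depth_distribution_py_alt (hierarchical_map : List (String × List (String × Int))) :
    List (Int × List (String × Int)) :=
  let buckets := hierarchical_map.foldl pvBStep PySem.Dict.empty
  buckets.items.map (fun p => (p.1, pvStats p.2))

-- ===== PRECONDITION & SPEC =====
def Spec_analyze_depth_distribution_py (hierarchical_map : List (String × List (String × Int))) (out : List (Int × List (String × Int))) : Prop := out = analyze_depth_distribution_py_alt hierarchical_map
instance (hierarchical_map : List (String × List (String × Int))) (out : List (Int × List (String × Int))) : Decidable (Spec_analyze_depth_distribution_py hierarchical_map out) := by unfold Spec_analyze_depth_distribution_py; infer_instance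

-- ===== CLAIM (what is proved, stated in full; the proofs are below) =====
def Claim_equal_analyze_depth_distribution_py : Prop := ∀ (hierarchical_map : List (String × List (String × Int))), Dom_analyze_depth_distribution_py hierarchical_map → Spec_analyze_depth_distribution_py hierarchical_map (analyze_depth_distribution_py hierarchical_map)

-- ===== LEMMAS AND PROOFS =====

-- A's stats dict for a bucket, as a PySem.Dict
def pvStatsD (g : List (List (String × Int))) : PySem.Dict String Int := PySem.Dict.ofList (pvStats g)

theorem pv_modify_modify {κ ν : Type} [BEq κ] [LawfulBEq κ] (d : PySem.Dict κ ν) (k : κ)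
    (c c' : ν) (f g : ν → ν) :
    (d.modify k c f).modify k c' g = d.insert k (g (f (d.getD k c))) := by
  show ((d.insert k (f (d.getD k c))).insert k
      (g ((d.insert k (f (d.getD k c))).getD k c'))) = _
  rw [PySem.Dict.getD_insert_self, PySem.Dict.insert_insert_self]

theorem pv_insert_modify {κ ν : Type} [BEq κ] [LawfulBEq κ] (d : PySem.Dict κ ν) (k : κ)
    (v c : ν) (f : ν → ν) :
    (d.insert k v).modify k c f = d.insert k (f v) := by
  show ((d.insert k v).insert k (f ((d.insert k v).getD k c))) = _
  rw [PySem.Dict.getD_insert_self, PySem.Dict.insert_insert_self]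

-- A's three mutations turn a bucket's stats dict into the extended bucket's stats dict
theorem pv_inner_step (g : List (List (String × Int))) (data : List (String × Int)) :
    (((pvStatsD g).modify "pages" 0 (· + 1)).modify "total_chunks" 0
        (· + pvGet0 data "total_chunks")).modify "structural_elements" 0
        (· + pvGet0 data "structural_elements")
      = pvStatsD (g ++ [data]) := by
  show PySem.Dict.mk [("pages", (g.length : Int) + 1),
      ("total_chunks", (g.map (fun d => pvGet0 d "total_chunks")).sum + pvGet0 data "total_chunks"),
      ("structural_elements", (g.map (fun d => pvGet0 d "structural_elements")).sum
        + pvGet0 data "structural_elements")]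
    = PySem.Dict.mk [("pages", ((g ++ [data]).length : Int)),
      ("total_chunks", ((g ++ [data]).map (fun d => pvGet0 d "total_chunks")).sum),
      ("structural_elements", ((g ++ [data]).map (fun d => pvGet0 d "structural_elements")).sum)]
  simp

-- one loop step preserves the relation between A's stats dict and B's buckets
theorem pv_step_items (d : PySem.Dict Int (PySem.Dict String Int))
    (b : PySem.Dict Int (List (List (String × Int))))
    (hnd : b.keys.Nodup)
    (h : d.items = b.items.map (fun p => (p.1, pvStatsD p.2)))
    (x : String × List (String × Int)) :
    (pvAStep d x).items = (pvBStep b x).items.map (fun p => (p.1, pvStatsD p.2)) := by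
  have hkeys : d.keys = b.keys := by
    simp only [PySem.Dict.keys, h, List.map_map]; rfl
  have hdnd : d.keys.Nodup := hkeys ▸ hnd
  set k := pvGet0 x.2 "depth" with hk
  have hc : d.contains k = b.contains k := by
    rw [PySem.Dict.contains_eq_decide_mem_keys, PySem.Dict.contains_eq_decide_mem_keys, hkeys]
  have hB : pvBStep b x = b.insert k (b.getD k [] ++ [x.2]) := rfl
  by_cases hb : b.contains k = true
  · -- depth already present
    obtain ⟨g, hg⟩ : ∃ g, (k, g) ∈ b.items := by
      have hm := (PySem.Dict.contains_iff_mem_keys b k).1 hb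
      simp only [PySem.Dict.keys, List.mem_map] at hm
      obtain ⟨p, hp, hpk⟩ := hm
      exact ⟨p.2, by simpa [← hpk] using hp⟩
    have hbg : b.getD k [] = g := PySem.Dict.getD_of_mem_items b hg hnd []
    have hdg : d.getD k PySem.Dict.empty = pvStatsD g := by
      have hmem : (k, pvStatsD g) ∈ d.items := by
        rw [h]; exact List.mem_map_of_mem hg
      exact PySem.Dict.getD_of_mem_items d hmem hdnd _
    have hA : pvAStep d x = d.insert k (pvStatsD (g ++ [x.2])) := by
      simp only [pvAStep, ← hk, hc, hb, if_true]
      simp only [pv_modify_modify, pv_insert_modify]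
      rw [hdg, pv_inner_step]
    rw [hA, hB, hbg,
      PySem.Dict.items_insert_of_contains _ _ (hc ▸ hb),
      PySem.Dict.items_insert_of_contains _ _ hb, h, List.map_map, List.map_map]
    congr 1
    funext p
    by_cases hpk : p.1 == k <;> simp [Function.comp, hpk]
  · -- new depth
    have hb' : b.contains k = false := by simpa using hb
    have hd' : d.contains k = false := by rw [hc, hb']
    have hA : pvAStep d x = d.insert k (pvStatsD [x.2]) := by
      simp only [pvAStep, ← hk, hd', Bool.false_eq_true, if_false]
      rw [show PySem.Dict.ofList [("pages", (0:Int)), ("total_chunks", 0), ("structural_elements", 0)]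
          = pvStatsD [] from rfl]
      simp only [pv_insert_modify]
      rw [pv_inner_step]
      rfl
    have hgd : b.getD k [] = [] := PySem.Dict.getD_of_not_contains b [] hb'
    rw [hA, hB, hgd,
      PySem.Dict.items_insert_of_not_contains _ _ hd',
      PySem.Dict.items_insert_of_not_contains _ _ hb', h, List.map_append]
    simp

-- the whole loops stay related
theorem pv_loop (l : List (String × List (String × Int))) :
    ∀ (d : PySem.Dict Int (PySem.Dict String Int))
      (b : PySem.Dict Int (List (List (String × Int)))),
      b.keys.Nodup →
      d.items = b.items.map (fun p => (p.1, pvStatsD p.2)) →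
      (l.foldl pvAStep d).items
        = (l.foldl pvBStep b).items.map (fun p => (p.1, pvStatsD p.2)) := by
  induction l with
  | nil => intro d b _ h; simpa using h
  | cons x l ih =>
    intro d b hnd h
    simp only [List.foldl_cons]
    exact ih _ _ (PySem.Dict.nodup_keys_insert b _ _ hnd) (pv_step_items d b hnd h x)

-- ===== VERDICT (by name: the statement is the Claim_ definition above) =====
theorem analyze_depth_distribution_py_spec : Claim_equal_analyze_depth_distribution_py := by
  intro hm _
  show analyze_depth_distribution_py hm = analyze_depth_distribution_py_alt hm
  simp only [analyze_depth_distribution_py, analyze_depth_distribution_py_alt]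
  rw [pv_loop hm PySem.Dict.empty PySem.Dict.empty PySem.Dict.nodup_keys_empty rfl, List.map_map]
  rfl
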